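-- pv_equiv track=rewrite | github.com/Jae-soon/Algorithmic | Programmers/Lv0/겹치는 선분의 길이.py | solution
-- ===== SOURCE A (Python) =====
-- def solution(lines):
--     line = {}
--     answer = 0
--
--     for i in lines:
--         for j in range(i[0], i[1]):
--             line[j] = 0
--
--     for i in lines:
--         for j in range(i[0], i[1]):
--             line[j] += 1
--
--     for key in line.keys():
--         if line[key] > 1:
--             answer += 1
--
--     return answer
-- ===== SOURCE B (Python) =====
-- def solution(lines):
--     # Sweep line: sort segment endpoints as +1/-1 events, sum interval lengths
--     # where at least two segments are active.  O(n log n) instead of O(n * L).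
--     events = []
--     for seg in lines:
--         a, b = seg[0], seg[1]
--         if a < b:
--             events.append((a, 1))
--             events.append((b, -1))
--     events.sort(key=lambda e: e[0])
--     total = 0
--     active = 0
--     prev = events[0][0] if events else 0
--     for x, d in events:
--         if active >= 2:
--             total += x - prev
--         active += d
--         prev = x
--     return total
-- ===== Notes on version B (the rewrite author's own statement) =====
-- stated objective: faster
-- what changed: Replaced the per-integer-cell dict enumeration of every segment with an endpoint sweep line: sort +1/-1 events and sum the lengths of gaps where at least two segments are active.
import Mathlib
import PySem

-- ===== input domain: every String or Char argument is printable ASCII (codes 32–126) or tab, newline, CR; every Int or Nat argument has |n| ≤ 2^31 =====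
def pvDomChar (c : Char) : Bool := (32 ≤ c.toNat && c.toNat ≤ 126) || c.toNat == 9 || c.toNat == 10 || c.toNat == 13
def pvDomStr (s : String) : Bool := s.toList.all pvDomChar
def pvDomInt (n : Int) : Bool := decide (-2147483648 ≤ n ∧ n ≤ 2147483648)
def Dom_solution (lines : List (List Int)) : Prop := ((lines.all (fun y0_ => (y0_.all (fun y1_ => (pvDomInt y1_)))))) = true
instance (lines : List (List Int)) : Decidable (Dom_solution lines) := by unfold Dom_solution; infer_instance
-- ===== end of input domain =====

-- B replaces A's per-cell dict enumeration by an endpoint sweep line (sort events, sum gaps with coverage ≥ 2); equivalence is proved on inputs where every segment has both endpoints.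

-- ===== PORT A =====
def solution (lines : List (List Int)) : Int :=
  -- line = {}; for i in lines: for j in range(i[0], i[1]): line[j] = 0
  let line : PySem.Dict Int Int :=
    lines.foldl (fun d i =>
      (PySem.List.pyRange ((PySem.List.pyGet? i 0).getD 0) ((PySem.List.pyGet? i 1).getD 0) 1).foldl
        (fun d j => d.insert j 0) d) PySem.Dict.empty
  -- for i in lines: for j in range(i[0], i[1]): line[j] += 1
  let line : PySem.Dict Int Int :=
    lines.foldl (fun d i =>
      (PySem.List.pyRange ((PySem.List.pyGet? i 0).getD 0) ((PySem.List.pyGet? i 1).getD 0) 1).foldl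
        (fun d j => d.modify j 0 (· + 1)) d) line
  -- for key in line.keys(): if line[key] > 1: answer += 1
  line.keys.foldl (fun answer key => if line.getD key 0 > 1 then answer + 1 else answer) 0

-- ===== PORT B =====
def solution_alt (lines : List (List Int)) : Int :=
  let events : List (Int × Int) :=
    lines.foldl (fun es i =>
      let a := (PySem.List.pyGet? i 0).getD 0
      let b := (PySem.List.pyGet? i 1).getD 0
      if a < b then es ++ [(a, 1), (b, -1)] else es) []
  let events := PySem.List.sorted events Prod.fst false
  let r : Int × Int × Int :=
    events.foldl (fun s e =>
      (if s.2.1 ≥ 2 then s.1 + (e.1 - s.2.2) else s.1, s.2.1 + e.2, e.1))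
      (0, 0, ((events.head?.map Prod.fst).getD 0))
  r.1

-- ===== PRECONDITION & SPEC =====
-- Pre_ excludes exactly the inputs on which Python A raises IndexError: a segment with fewer than two endpoints.
def Pre_solution (lines : List (List Int)) : Prop := ∀ i ∈ lines, 2 ≤ i.length
instance (lines : List (List Int)) : Decidable (Pre_solution lines) := by unfold Pre_solution; infer_instance
def pvWitness_solution : List (List Int) := [[0, 2], [1, 3]]

def Spec_solution (lines : List (List Int)) (out : Int) : Prop := out = solution_alt lines
instance (lines : List (List Int)) (out : Int) : Decidable (Spec_solution lines out) := by unfold Spec_solution; infer_instance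

-- ===== CLAIM (what is proved, stated in full; the proofs are below) =====
def Claim_equal_solution : Prop := ∀ (lines : List (List Int)), Dom_solution lines → Pre_solution lines → Spec_solution lines (solution lines)


-- ===== LEMMAS AND PROOFS =====

-- Proof-only helpers (abbreviations over the two ports' data).
def pvA (i : List Int) : Int := (PySem.List.pyGet? i 0).getD 0
def pvB (i : List Int) : Int := (PySem.List.pyGet? i 1).getD 0
def pvRng (i : List Int) : List Int := PySem.List.pyRange (pvA i) (pvB i) 1
def pvCells (lines : List (List Int)) : List Int := lines.flatMap pvRng
def pvCov (lines : List (List Int)) (j : Int) : Nat :=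
  lines.countP (fun i => decide (pvA i ≤ j ∧ j < pvB i))
def pvEvSeg (i : List Int) : List (Int × Int) :=
  if pvA i < pvB i then [(pvA i, 1), (pvB i, -1)] else []
def pvEv (lines : List (List Int)) : List (Int × Int) := lines.flatMap pvEvSeg
def pvSumLE (es : List (Int × Int)) (j : Int) : Int :=
  ((es.filter (fun e => decide (e.1 ≤ j))).map Prod.snd).sum
def pvN (lines : List (List Int)) (lo hi : Int) : Int :=
  ((PySem.List.pyRange lo hi 1).countP (fun j => decide (2 ≤ pvCov lines j)) : Int)
def pvLastX (es : List (Int × Int)) (dflt : Int) : Int :=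
  ((es.getLast?).map Prod.fst).getD dflt

-- A's first loop only ever stores 0.
lemma pv_getD_insert_zero (cs : List Int) : ∀ (d : PySem.Dict Int Int) (v : Int),
    d.getD v 0 = 0 → (cs.foldl (fun d j => d.insert j 0) d).getD v 0 = 0 := by
  induction cs with
  | nil => intro d v h; simpa using h
  | cons c cs ih =>
    intro d v h
    simp only [List.foldl_cons]
    apply ih
    by_cases hv : v = c
    · subst hv; simp [PySem.Dict.getD_insert_self]
    · rw [PySem.Dict.getD_insert_of_ne _ _ _ hv]; exact h

-- Set.update by elements already present is the identity.
lemma pv_set_update_of_subset : ∀ (xs : List Int) (s : PySem.Set Int),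
    (∀ x ∈ xs, x ∈ s) → PySem.Set.update s xs = s := by
  intro xs
  induction xs with
  | nil => intro s _; rfl
  | cons x xs ih =>
    intro s h
    have hadd : s.add x = s := by simp [PySem.Set.add, h x (by simp)]
    show PySem.Set.update (s.add x) xs = s
    rw [hadd]
    exact ih s (fun y hy => h y (by simp [hy]))

-- count of one segment's range
lemma pv_count_cells_step (a b j : Int) :
    (PySem.List.pyRange a b 1).count j = (if a ≤ j ∧ j < b then 1 else 0) := by
  split_ifs with h
  · exact List.count_eq_one_of_mem (PySem.List.nodup_pyRange_one a b) (PySem.List.mem_pyRange_one.2 h)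
  · exact List.count_eq_zero_of_not_mem (fun hm => h (PySem.List.mem_pyRange_one.1 hm))

-- multiplicity of a cell in the concatenated ranges = its coverage
lemma pv_count_cells (lines : List (List Int)) (j : Int) :
    (pvCells lines).count j = pvCov lines j := by
  induction lines with
  | nil => rfl
  | cons i ls ih =>
    simp only [pvCells, pvCov, List.flatMap_cons, List.count_append, List.countP_cons] at *
    rw [ih]
    simp only [pvRng, pv_count_cells_step, decide_eq_true_eq]
    split_ifs with h <;> omega

-- Port A computes the number of distinct covered cells with coverage ≥ 2.
lemma pv_solution_eq_countP (lines : List (List Int)) :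
    solution lines =
      (((PySem.Set.ofList (pvCells lines)).countP (fun j => decide (2 ≤ pvCov lines j)) : Nat) : Int) := by
  have hflat1 : lines.foldl (fun d i =>
      (PySem.List.pyRange ((PySem.List.pyGet? i 0).getD 0) ((PySem.List.pyGet? i 1).getD 0) 1).foldl
        (fun d j => d.insert j (0 : Int)) d) PySem.Dict.empty
      = (pvCells lines).foldl (fun d j => d.insert j (0 : Int)) PySem.Dict.empty := by
    rw [← List.foldl_flatMap]; rfl
  have hflat2 : ∀ d : PySem.Dict Int Int, lines.foldl (fun d i =>
      (PySem.List.pyRange ((PySem.List.pyGet? i 0).getD 0) ((PySem.List.pyGet? i 1).getD 0) 1).foldl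
        (fun d j => d.modify j 0 (· + 1)) d) d
      = (pvCells lines).foldl (fun d j => d.modify j 0 (· + 1)) d := by
    intro d; rw [← List.foldl_flatMap]; rfl
  unfold solution
  simp only [gt_iff_lt]
  rw [hflat1, hflat2]
  set d1 := (pvCells lines).foldl (fun d j => d.insert j (0 : Int)) PySem.Dict.empty with hd1
  set d2 := (pvCells lines).foldl (fun d j => d.modify j 0 (· + 1)) d1 with hd2
  have hk1 : d1.keys = PySem.Set.ofList (pvCells lines) := by
    rw [hd1, PySem.Dict.keys_foldl_insert (f := fun _ _ => (0 : Int))]; rfl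
  have hk2 : d2.keys = PySem.Set.ofList (pvCells lines) := by
    rw [hd2, PySem.Dict.keys_foldl_modify (f := fun _ _ v => v + 1), hk1]
    exact pv_set_update_of_subset _ _ (fun x hx => (PySem.Set.mem_ofList _ x).2 hx)
  have hval : ∀ v : Int, d2.getD v 0 = ((pvCells lines).count v : Int) := by
    intro v
    rw [hd2, PySem.Dict.getD_foldl_modify_add_one,
        pv_getD_insert_zero (pvCells lines) PySem.Dict.empty v (by rfl)]
    ring
  have hfun : (fun (answer key : Int) => if d2.getD key 0 > 1 then answer + 1 else answer)
      = (fun answer key => if (fun k => decide (1 < d2.getD k 0)) key = true then answer + 1 else answer) := by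
    funext a k; simp [gt_iff_lt]
  rw [hfun, PySem.List.foldl_count_if, hk2]
  have hpq : ∀ k ∈ PySem.Set.ofList (pvCells lines),
      decide (1 < d2.getD k 0) = true ↔ (fun j => decide (2 ≤ pvCov lines j)) k = true := by
    intro k _
    simp only [decide_eq_true_eq, hval, pv_count_cells]
    omega
  rw [List.countP_congr hpq]
  omega

-- coverage as the sum of event deltas at coordinates ≤ j
lemma pv_cov_eq_sumLE (lines : List (List Int)) (j : Int) :
    (pvCov lines j : Int) = pvSumLE (pvEv lines) j := by
  induction lines with
  | nil => rfl
  | cons i ls ih =>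
    simp only [pvCov, pvEv, pvSumLE, List.countP_cons, List.flatMap_cons,
      List.filter_append, List.map_append, List.sum_append] at *
    rw [← ih]
    unfold pvEvSeg
    by_cases hab : pvA i < pvB i
    · simp only [hab, if_true]
      by_cases h1 : pvA i ≤ j
      · by_cases h2 : j < pvB i
        · simp [List.filter, h1, h2, not_le.2 h2]
          try omega
        · simp only [not_lt] at h2
          simp [List.filter, h1, h2]
          try omega
      · have h2 : ¬ pvB i ≤ j := by omega
        simp [List.filter, h1, h2]
        try omega
    · have : ¬ (pvA i ≤ j ∧ j < pvB i) := by omega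
      simp [hab, this]

lemma pv_sumLE_perm {es es' : List (Int × Int)} (hp : es.Perm es') (j : Int) :
    pvSumLE es j = pvSumLE es' j := by
  exact ((hp.filter _).map Prod.snd).sum_eq

lemma pv_le_lastX : ∀ (es : List (Int × Int)), es.Pairwise (fun p q => p.1 ≤ q.1) →
    ∀ (dflt : Int) (e : Int × Int), e ∈ es → e.1 ≤ pvLastX es dflt := by
  intro es
  induction es with
  | nil => intro _ _ e he; cases he
  | cons a es ih =>
    intro hs dflt e he
    cases es with
    | nil =>
      rcases List.mem_cons.1 he with rfl | hm
      · simp [pvLastX]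
      · cases hm
    | cons b t =>
      have hlx : pvLastX (a :: b :: t) dflt = pvLastX (b :: t) dflt := by
        simp [pvLastX, List.getLast?_cons_cons]
      rw [hlx]
      rcases List.mem_cons.1 he with rfl | hm
      · exact le_trans (List.rel_of_pairwise_cons hs (List.mem_cons_self))
          (ih hs.tail dflt b (List.mem_cons_self))
      · exact ih hs.tail dflt e hm

-- the sweep loop sums exactly the pvN measure of [prev, last event)
lemma pv_pvN_split (lines : List (List Int)) {lo mid hi : Int} (h1 : lo ≤ mid) (h2 : mid ≤ hi) :
    pvN lines lo hi = pvN lines lo mid + pvN lines mid hi := by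
  unfold pvN
  rw [PySem.List.pyRange_one_append lo mid hi h1 h2, List.countP_append]
  push_cast
  ring

lemma pv_pvN_const (lines : List (List Int)) {lo mid active : Int} (hlm : lo ≤ mid)
    (h : ∀ j, lo ≤ j → j < mid → (pvCov lines j : Int) = active) :
    pvN lines lo mid = if active ≥ 2 then mid - lo else 0 := by
  unfold pvN
  split_ifs with ha
  · rw [List.countP_eq_length.2 (fun j hj => by
      have hm := PySem.List.mem_pyRange_one.1 hj
      have := h j hm.1 hm.2
      simp only [decide_eq_true_eq]
      omega)]
    rw [PySem.List.length_pyRange_one]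
    omega
  · rw [List.countP_eq_zero.2 (fun j hj => by
      have hm := PySem.List.mem_pyRange_one.1 hj
      have := h j hm.1 hm.2
      simp only [decide_eq_true_eq]
      omega)]
    rfl

lemma pv_sweep (lines : List (List Int)) (es : List (Int × Int)) :
    ∀ (total active prev : Int),
    es.Pairwise (fun p q => p.1 ≤ q.1) →
    (∀ e ∈ es, prev ≤ e.1) →
    (∀ j : Int, prev ≤ j → (pvCov lines j : Int) = active + pvSumLE es j) →
    (es.foldl (fun s e =>
        (if s.2.1 ≥ 2 then s.1 + (e.1 - s.2.2) else s.1, s.2.1 + e.2, e.1))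
      (total, active, prev)).1 = total + pvN lines prev (pvLastX es prev) := by
  induction es with
  | nil =>
    intro total active prev _ _ _
    simp [pvLastX, pvN, PySem.List.pyRange_one_eq_nil (le_refl prev)]
  | cons e es ih =>
    intro total active prev hs hprev hcov
    have hpe : prev ≤ e.1 := hprev e List.mem_cons_self
    have htail : ∀ f ∈ es, e.1 ≤ f.1 := fun f hf => List.rel_of_pairwise_cons hs hf
    have hlx : pvLastX (e :: es) prev = pvLastX es e.1 := by
      cases es with
      | nil => simp [pvLastX]
      | cons b t =>
        obtain ⟨x, hx⟩ := Option.isSome_iff_exists.1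
          (by simp [List.getLast?_isSome] : (b :: t).getLast?.isSome = true)
        simp [pvLastX, List.getLast?_cons_cons, hx]
    have hL : e.1 ≤ pvLastX es e.1 := by
      cases es with
      | nil => simp [pvLastX]
      | cons b t =>
        exact le_trans (htail b List.mem_cons_self)
          (pv_le_lastX (b :: t) hs.tail e.1 b List.mem_cons_self)
    have hcov' : ∀ j : Int, e.1 ≤ j → (pvCov lines j : Int) = (active + e.2) + pvSumLE es j := by
      intro j hj
      rw [hcov j (le_trans hpe hj)]
      simp only [pvSumLE, List.filter_cons, decide_eq_true_eq, hj, if_pos, List.map_cons,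
        List.sum_cons]
      ring
    have hconst : pvN lines prev e.1 = if active ≥ 2 then e.1 - prev else 0 := by
      apply pv_pvN_const lines hpe
      intro j hj1 hj2
      rw [hcov j hj1]
      have hnil : (e :: es).filter (fun f => decide (f.1 ≤ j)) = [] := by
        rw [List.filter_eq_nil_iff]
        intro f hf
        simp only [decide_eq_true_eq, not_le]
        rcases List.mem_cons.1 hf with rfl | hm
        · exact hj2
        · exact lt_of_lt_of_le hj2 (htail f hm)
      simp [pvSumLE, hnil]
    simp only [List.foldl_cons]
    rw [ih (if active ≥ 2 then total + (e.1 - prev) else total) (active + e.2) e.1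
        hs.tail htail hcov', hlx,
        pv_pvN_split lines hpe hL, hconst]
    split_ifs <;> ring

-- counting a predicate over the distinct cells = counting it over any covering range
lemma pv_countP_set_eq_range (cs : List Int) (p : Int → Bool) (lo hi : Int)
    (h : ∀ j, p j = true → (j ∈ cs ∧ lo ≤ j ∧ j < hi)) :
    (PySem.Set.ofList cs).countP p = (PySem.List.pyRange lo hi 1).countP p := by
  rw [List.countP_eq_length_filter, List.countP_eq_length_filter]
  apply List.Perm.length_eq
  rw [List.perm_ext_iff_of_nodup ((PySem.Set.nodup_ofList cs).filter p)
      ((PySem.List.nodup_pyRange_one lo hi).filter p)]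
  intro a
  simp only [List.mem_filter, PySem.Set.mem_ofList, PySem.List.mem_pyRange_one]
  constructor
  · rintro ⟨-, hp⟩; exact ⟨(h a hp).2, hp⟩
  · rintro ⟨-, hp⟩; exact ⟨(h a hp).1, hp⟩

lemma pv_events_fold (lines : List (List Int)) : ∀ (acc : List (Int × Int)),
    lines.foldl (fun es i =>
      if (PySem.List.pyGet? i 0).getD 0 < (PySem.List.pyGet? i 1).getD 0
      then es ++ [((PySem.List.pyGet? i 0).getD 0, 1), ((PySem.List.pyGet? i 1).getD 0, -1)]
      else es) acc = acc ++ pvEv lines := by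
  induction lines with
  | nil => intro acc; simp [pvEv]
  | cons i ls ih =>
    intro acc
    simp only [List.foldl_cons, pvEv, List.flatMap_cons]
    rw [ih]
    unfold pvEvSeg pvA pvB
    split_ifs with h
    · rw [List.append_assoc]; rfl
    · rfl

-- ===== VERDICT (by name: the statement is the Claim_ definition above) =====
theorem solution_spec : Claim_equal_solution := by
  intro lines _ _
  unfold Spec_solution solution_alt
  simp only [pv_events_fold, List.nil_append]
  rcases h : PySem.List.sorted (pvEv lines) Prod.fst false with _ | ⟨m, t⟩
  · -- no events: every coverage is 0, both sides are 0
    have hev : pvEv lines = [] := (PySem.List.sorted_eq_nil_iff _ _ _).1 h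
    simp only [List.foldl_nil]
    rw [pv_solution_eq_countP]
    have hz : ∀ j : Int, pvCov lines j = 0 := by
      intro j
      have h0 := pv_cov_eq_sumLE lines j
      rw [hev] at h0
      simp [pvSumLE] at h0
      omega
    rw [List.countP_eq_zero.2 (fun j _ => by simp [hz j])]
    rfl
  · have hpair : (m :: t).Pairwise (fun p q => p.1 ≤ q.1) := by
      rw [← h]; exact PySem.List.sorted_pairwise _ _
    have hperm : (m :: t).Perm (pvEv lines) := by
      rw [← h]; exact PySem.List.sorted_perm _ _ _
    have hhead : ∀ y ∈ pvEv lines, m.1 ≤ y.1 := PySem.List.key_head_sorted_le _ _ h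
    have hprev : ∀ e ∈ m :: t, m.1 ≤ e.1 := by
      intro e he
      rcases List.mem_cons.1 he with rfl | hm
      · exact le_refl _
      · exact List.rel_of_pairwise_cons hpair hm
    have hcov : ∀ j : Int, m.1 ≤ j → (pvCov lines j : Int) = 0 + pvSumLE (m :: t) j := by
      intro j _
      rw [pv_cov_eq_sumLE lines j, pv_sumLE_perm hperm.symm j, zero_add]
    simp only [List.head?_cons, Option.map_some, Option.getD_some]
    rw [pv_sweep lines (m :: t) 0 0 m.1 hpair hprev hcov, pv_solution_eq_countP,
        pv_countP_set_eq_range (pvCells lines) _ m.1 (pvLastX (m :: t) m.1) ?_, zero_add]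
    · rfl
    · intro j hp
      have hcp : 2 ≤ pvCov lines j := of_decide_eq_true hp
      have hpos : 0 < (lines.countP (fun i => decide (pvA i ≤ j ∧ j < pvB i))) := by
        unfold pvCov at hcp; omega
      obtain ⟨i, hi, hpi⟩ := List.countP_pos_iff.1 hpos
      obtain ⟨h1, h2⟩ := of_decide_eq_true hpi
      have hab : pvA i < pvB i := lt_of_le_of_lt h1 h2
      have hm1 : (pvA i, (1 : Int)) ∈ pvEv lines :=
        List.mem_flatMap.2 ⟨i, hi, by simp [pvEvSeg, hab]⟩
      have hm2 : (pvB i, (-1 : Int)) ∈ pvEv lines :=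
        List.mem_flatMap.2 ⟨i, hi, by simp [pvEvSeg, hab]⟩
      refine ⟨List.mem_flatMap.2 ⟨i, hi, PySem.List.mem_pyRange_one.2 ⟨h1, h2⟩⟩, ?_, ?_⟩
      · exact le_trans (hhead _ hm1) h1
      · exact lt_of_lt_of_le h2
          (pv_le_lastX (m :: t) hpair m.1 _ (hperm.mem_iff.2 hm2))
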